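-- pv_equiv track=rewrite | github.com/Vvaradinov/ICS-31-Fall | Lab9.py | tally_days_worked
-- ===== SOURCE A (Python) =====
-- def tally_days_worked(L:list) -> dict:
--     """ Returns dict where every key is a name of an employee and the value is the number of days worked for a week"""
--     workers = {}
--     for obj in L:
--         if obj == "Bob":
--             workers[obj] = L.count("Bob")
--         if obj == "Kyle":
--             workers[obj] = L.count("Kyle")
--         if obj == "Larry":
--             workers[obj] = L.count("Larry")
--         if obj == "Brenda":
--             workers[obj] = L.count("Brenda")
--         if obj == "Samantha":
--             workers[obj] = L.count("Samantha")
--         if obj == "Jane":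
--             workers[obj] = L.count("Jane")
--     return workers
-- ===== SOURCE B (Python) =====
-- def tally_days_worked(L: list) -> dict:
--     """ Returns dict where every key is a name of an employee and the value is the number of days worked for a week"""
--     counts = {}
--     for name in L:
--         counts[name] = counts.get(name, 0) + 1
--     allowed = ("Bob", "Kyle", "Larry", "Brenda", "Samantha", "Jane")
--     return {name: n for name, n in counts.items() if name in allowed}
-- ===== Notes on version B (the rewrite author's own statement) =====
-- stated objective: alternative
-- what changed: Replaces A's per-element chain of six equality tests, each triggering a full L.count scan, with one frequency-table pass over the whole list followed by a projection of the table onto the six allowed names.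
import Mathlib
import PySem

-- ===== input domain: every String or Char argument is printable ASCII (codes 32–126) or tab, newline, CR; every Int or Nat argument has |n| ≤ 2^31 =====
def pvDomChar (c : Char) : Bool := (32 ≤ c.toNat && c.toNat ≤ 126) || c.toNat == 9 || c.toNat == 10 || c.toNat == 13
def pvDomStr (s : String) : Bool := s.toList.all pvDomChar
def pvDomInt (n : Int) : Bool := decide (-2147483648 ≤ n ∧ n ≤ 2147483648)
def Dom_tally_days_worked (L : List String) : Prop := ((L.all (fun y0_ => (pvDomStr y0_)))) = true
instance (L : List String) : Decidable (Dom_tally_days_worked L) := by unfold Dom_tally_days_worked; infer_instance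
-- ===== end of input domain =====

-- B replaces A's per-element chain of six equality tests, each triggering a full L.count scan,
-- with one frequency-table pass over L followed by a projection onto the six allowed names.

-- ===== PORT A =====
-- A: for each obj in L, six sequential 'if obj == name: workers[obj] = L.count(name)' statements.
def tally_days_worked (L : List String) : List (String × Int) :=
  (L.foldl (fun (workers : PySem.Dict String Int) obj =>
      let workers := if obj == "Bob" then workers.insert obj ((PySem.List.count L "Bob" : Int)) else workers
      let workers := if obj == "Kyle" then workers.insert obj ((PySem.List.count L "Kyle" : Int)) else workers
      let workers := if obj == "Larry" then workers.insert obj ((PySem.List.count L "Larry" : Int)) else workers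
      let workers := if obj == "Brenda" then workers.insert obj ((PySem.List.count L "Brenda" : Int)) else workers
      let workers := if obj == "Samantha" then workers.insert obj ((PySem.List.count L "Samantha" : Int)) else workers
      let workers := if obj == "Jane" then workers.insert obj ((PySem.List.count L "Jane" : Int)) else workers
      workers)
    PySem.Dict.empty).items

-- ===== PORT B =====
def pvAllowed : List String := ["Bob", "Kyle", "Larry", "Brenda", "Samantha", "Jane"]

-- B: counts[name] = counts.get(name, 0) + 1 over L, then the dict comprehension
-- {name: n for name, n in counts.items() if name in allowed}.
def tally_days_worked_alt (L : List String) : List (String × Int) :=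
  let counts := L.foldl (fun (d : PySem.Dict String Int) name => d.insert name (d.getD name 0 + 1)) PySem.Dict.empty
  (counts.items.foldl (fun (d : PySem.Dict String Int) p =>
      if pvAllowed.contains p.1 then d.insert p.1 p.2 else d) PySem.Dict.empty).items

-- ===== PRECONDITION & SPEC =====
def Spec_tally_days_worked (L : List String) (out : List (String × Int)) : Prop := out = tally_days_worked_alt L
instance (L : List String) (out : List (String × Int)) : Decidable (Spec_tally_days_worked L out) := by unfold Spec_tally_days_worked; infer_instance

-- ===== CLAIM (what is proved, stated in full; the proofs are below) =====
def Claim_equal_tally_days_worked : Prop := ∀ (L : List String), Dom_tally_days_worked L → Spec_tally_days_worked L (tally_days_worked L)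

-- ===== LEMMAS AND PROOFS =====

-- the common normal form both programs reach: allowed first occurrences, each with its count in L
def pvTarget (L : List String) : List (String × Int) :=
  ((PySem.Set.ofList L).filter (fun x => pvAllowed.contains x)).map (fun x => (x, (PySem.List.count L x : Int)))

-- A's six sequential ifs collapse to one conditional insert
lemma pvStepA (L : List String) (w : PySem.Dict String Int) (obj : String) :
    (let w1 := if obj == "Bob" then w.insert obj ((PySem.List.count L "Bob" : Int)) else w
     let w2 := if obj == "Kyle" then w1.insert obj ((PySem.List.count L "Kyle" : Int)) else w1
     let w3 := if obj == "Larry" then w2.insert obj ((PySem.List.count L "Larry" : Int)) else w2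
     let w4 := if obj == "Brenda" then w3.insert obj ((PySem.List.count L "Brenda" : Int)) else w3
     let w5 := if obj == "Samantha" then w4.insert obj ((PySem.List.count L "Samantha" : Int)) else w4
     let w6 := if obj == "Jane" then w5.insert obj ((PySem.List.count L "Jane" : Int)) else w5
     w6)
    = if pvAllowed.contains obj then w.insert obj ((PySem.List.count L obj : Int)) else w := by
  by_cases h1 : obj = "Bob" <;> by_cases h2 : obj = "Kyle" <;> by_cases h3 : obj = "Larry" <;>
    by_cases h4 : obj = "Brenda" <;> by_cases h5 : obj = "Samantha" <;> by_cases h6 : obj = "Jane" <;>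
    simp_all [pvAllowed]

-- conditional insert over a list = insert over the filtered list
lemma pvFoldlIte {α : Type} (g : PySem.Dict String Int → α → PySem.Dict String Int)
    (Q : α → Bool) :
    ∀ (l : List α) (d : PySem.Dict String Int),
      l.foldl (fun d a => if Q a then g d a else d) d = (l.filter Q).foldl g d := by
  intro l
  induction l with
  | nil => intro d; rfl
  | cons a l ih =>
      intro d
      by_cases h : Q a = true <;> simp [h, ih]

-- membership of a key in the normal-form dict
lemma pvContainsMk (L : List String) (S : List String) (a : String) :
    (PySem.Dict.mk ((S.filter (fun x => pvAllowed.contains x)).map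
        (fun x => (x, (PySem.List.count L x : Int))))).contains a = true
    ↔ a ∈ S ∧ pvAllowed.contains a = true := by
  rw [PySem.Dict.contains_iff_mem_keys, PySem.Dict.keys_mk, List.map_map]
  constructor
  · intro h
    rcases List.mem_map.mp h with ⟨x, hx, hxa⟩
    have hxa' : x = a := hxa
    rcases List.mem_filter.mp hx with ⟨hS, hP⟩
    exact ⟨hxa' ▸ hS, hxa' ▸ hP⟩
  · rintro ⟨hS, hP⟩
    exact List.mem_map.mpr ⟨a, List.mem_filter.mpr ⟨hS, hP⟩, rfl⟩

lemma pvAFold (L : List String) (p : List String) :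
    (p.foldl (fun (w : PySem.Dict String Int) obj =>
        if pvAllowed.contains obj then w.insert obj ((PySem.List.count L obj : Int)) else w)
      PySem.Dict.empty)
    = PySem.Dict.mk (((PySem.Set.ofList p).filter (fun x => pvAllowed.contains x)).map
        (fun x => (x, (PySem.List.count L x : Int)))) := by
  induction p using List.reverseRecOn with
  | nil => rfl
  | append_singleton p a ih =>
      rw [List.foldl_append, List.foldl_cons, List.foldl_nil, ih,
        PySem.Set.ofList_append_singleton, PySem.Set.add_eq_ite]
      by_cases hP : pvAllowed.contains a = true
      · by_cases hm : a ∈ PySem.Set.ofList p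
        · -- a already recorded: overwrite in place with the same value
          rw [if_pos hP, if_pos hm]
          apply PySem.Dict.ext
          rw [PySem.Dict.items_insert_of_contains _ _
            ((pvContainsMk L (PySem.Set.ofList p) a).mpr ⟨hm, hP⟩)]
          show List.map _ (((PySem.Set.ofList p).filter _).map _) = _
          rw [List.map_map]
          apply List.map_congr_left
          intro x _
          by_cases hxa : x = a <;> simp [hxa]
        · -- a is a new allowed name: both sides append (a, count a)
          rw [if_pos hP, if_neg hm, List.filter_append]
          have hsing : List.filter (fun x => pvAllowed.contains x) [a] = [a] := by
            rw [List.filter_cons, if_pos hP]; rfl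
          rw [hsing, List.map_append]
          apply PySem.Dict.ext
          have hnc : (PySem.Dict.mk (((PySem.Set.ofList p).filter (fun x => pvAllowed.contains x)).map
              (fun x => (x, (PySem.List.count L x : Int))))).contains a = false := by
            rw [Bool.eq_false_iff, Ne]
            intro h
            exact hm ((pvContainsMk L (PySem.Set.ofList p) a).mp h).1
          rw [PySem.Dict.items_insert_of_not_contains _ _ hnc]
          rfl
      · -- a not an allowed name: both sides are unchanged
        rw [if_neg hP]
        by_cases hm : a ∈ PySem.Set.ofList p
        · rw [if_pos hm]
        · rw [if_neg hm, List.filter_append]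
          have hsing : List.filter (fun x => pvAllowed.contains x) [a] = [] := by
            rw [List.filter_cons, if_neg hP]; rfl
          rw [hsing, List.append_nil]

lemma pvA_eq_target (L : List String) : tally_days_worked L = pvTarget L := by
  unfold tally_days_worked pvTarget
  have hstep : (fun (w : PySem.Dict String Int) obj =>
      let w1 := if obj == "Bob" then w.insert obj ((PySem.List.count L "Bob" : Int)) else w
      let w2 := if obj == "Kyle" then w1.insert obj ((PySem.List.count L "Kyle" : Int)) else w1
      let w3 := if obj == "Larry" then w2.insert obj ((PySem.List.count L "Larry" : Int)) else w2
      let w4 := if obj == "Brenda" then w3.insert obj ((PySem.List.count L "Brenda" : Int)) else w3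
      let w5 := if obj == "Samantha" then w4.insert obj ((PySem.List.count L "Samantha" : Int)) else w4
      let w6 := if obj == "Jane" then w5.insert obj ((PySem.List.count L "Jane" : Int)) else w5
      w6)
      = (fun (w : PySem.Dict String Int) obj =>
          if pvAllowed.contains obj then w.insert obj ((PySem.List.count L obj : Int)) else w) := by
    funext w obj; exact pvStepA L w obj
  rw [hstep, pvAFold L L]

lemma pvB_eq_target (L : List String) : tally_days_worked_alt L = pvTarget L := by
  show (((L.foldl (fun (d : PySem.Dict String Int) name => d.insert name (d.getD name 0 + 1))
      PySem.Dict.empty).items).foldl (fun (d : PySem.Dict String Int) p =>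
      if pvAllowed.contains p.1 then d.insert p.1 p.2 else d) PySem.Dict.empty).items = pvTarget L
  rw [PySem.Dict.foldl_insert_getD_add_one_eq_counter, PySem.Dict.items_counter,
    pvFoldlIte, List.filter_map]
  have hpred : ((fun (p : String × Int) => pvAllowed.contains p.1) ∘
      (fun k => (k, (List.count k L : Int)))) = fun x => pvAllowed.contains x := by
    funext x; rfl
  rw [hpred]
  have hnodup : ((((PySem.Set.ofList L).filter (fun x => pvAllowed.contains x)).map
      (fun k => (k, (List.count k L : Int)))).map (fun (p : String × Int) => p.1)).Nodup := by
    rw [List.map_map]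
    have hid : (((PySem.Set.ofList L).filter (fun x => pvAllowed.contains x)).map
        ((fun (p : String × Int) => p.1) ∘ (fun k => (k, (List.count k L : Int)))))
        = (PySem.Set.ofList L).filter (fun x => pvAllowed.contains x) := by
      simp [Function.comp_def]
    rw [hid]
    exact (PySem.Set.nodup_ofList L).filter _
  have hfresh := PySem.Dict.items_foldl_insert_fresh
    (((PySem.Set.ofList L).filter (fun x => pvAllowed.contains x)).map
      (fun k => (k, (List.count k L : Int))))
    (fun p => p.1) (fun p => p.2) PySem.Dict.empty (fun a _ => rfl) hnodup
  rw [hfresh]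
  unfold pvTarget
  simp [PySem.List.count, Function.comp_def, PySem.Dict.empty]

-- ===== VERDICT (by name: the statement is the Claim_ definition above) =====
theorem tally_days_worked_spec : Claim_equal_tally_days_worked := by
  intro L _
  unfold Spec_tally_days_worked
  rw [pvA_eq_target, pvB_eq_target]
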